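-- pv_equiv track=rewrite | github.com/jinghaox/CodeingPractice | LongestPalindromeSubstring/LongestPalindromicSubstringDP.py | my_longest_palin_2d_array
-- ===== SOURCE A (Python) =====
-- def my_longest_palin_2d_array(s):
--     # note: this won't return the correct longest palindrome substring
--     if s=="":
--         return s
--     max_len = 1000
--     dp = [[0 for x in range(max_len)] for y in range(max_len)]
--     max_p = 0
--
--     len_s = len(s)
--     for j in range(len_s):
--         for i in range(0, j):
--             if s[i] == s[j]:
--                 dp[i][j] = 1
--
--             if dp[i][j] == 1:
--                 if (j-i+1 > max_p):
--                     max_p = j-i+1;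
--                     res = s[i:j+1]
--     return res
-- ===== SOURCE B (Python) =====
-- def my_longest_palin_2d_array(s):
--     # Single pass: remember each character's first occurrence; for each position j
--     # the widest span ending at j is j - first[s[j]] + 1; keep the first strict maximum.
--     # Returns None when the string has no repeated character (A has no answer there either).
--     if s == "":
--         return s
--     first = {}
--     best_len = 0
--     best = None
--     for j, c in enumerate(s):
--         if c in first:
--             span = j - first[c] + 1
--             if span > best_len:
--                 best_len = span
--                 best = s[first[c]:j + 1]
--         else:
--             first[c] = j
--     return best
-- ===== Notes on version B (the rewrite author's own statement) =====
-- stated objective: faster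
-- what changed: Replaced A's 1000x1000 dp table and O(n^2) nested index loops by a single left-to-right pass that records each character's first occurrence in a dict and maximizes the span j - first[s[j]] + 1.
import Mathlib
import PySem

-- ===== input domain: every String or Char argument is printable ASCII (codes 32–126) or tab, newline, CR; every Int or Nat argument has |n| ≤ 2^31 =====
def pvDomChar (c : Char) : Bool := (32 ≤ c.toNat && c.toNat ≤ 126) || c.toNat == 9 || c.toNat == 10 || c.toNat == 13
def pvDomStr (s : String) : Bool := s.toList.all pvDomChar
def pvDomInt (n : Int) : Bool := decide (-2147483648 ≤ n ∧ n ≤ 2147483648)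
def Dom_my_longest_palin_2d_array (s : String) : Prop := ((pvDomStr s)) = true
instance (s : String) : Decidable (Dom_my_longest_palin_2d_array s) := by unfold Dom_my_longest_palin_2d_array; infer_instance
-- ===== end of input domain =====

-- B replaces A's 1000×1000 dp table and O(n^2) double loop by a single pass that remembers each
-- character's first occurrence and maximizes the span j - first[s[j]] + 1 (objective: faster).

-- ===== PORT A =====
-- Inner-loop body of A. Python's dp is a 1000×1000 zero matrix mutated in place; it is modeled as a
-- total function Int → Int → Int updated pointwise (Python raises IndexError past index 999 — those
-- inputs are outside Pre_). s[i] / s[j] are always in range here (0 ≤ i < j < len(s)), ported with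
-- pyGetD; the string slice s[i:j+1] is PySem.List.slice on the code points, repacked with String.ofList.
def aBody (cs : List Char) (j : Int) (st : (Int → Int → Int) × Int × Option String) (i : Int) :
    (Int → Int → Int) × Int × Option String :=
  let dp1 : Int → Int → Int :=
    if PySem.List.pyGetD cs i ' ' = PySem.List.pyGetD cs j ' ' then
      fun a b => if a = i ∧ b = j then 1 else st.1 a b
    else st.1
  if dp1 i j = 1 then
    if j - i + 1 > st.2.1 then
      (dp1, j - i + 1, some (String.ofList (PySem.List.slice cs (some i) (some (j + 1)))))
    else (dp1, st.2.1, st.2.2)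
  else (dp1, st.2.1, st.2.2)

def my_longest_palin_2d_array (s : String) : String :=
  if s = "" then s
  else
    -- res is modeled as Option String (none = still unbound); Python raises UnboundLocalError when
    -- it is still none at the return — those inputs are outside Pre_, the .getD "" is never reached.
    ((PySem.List.pyRange 0 (PySem.List.len s.toList) 1).foldl
        (fun st j => (PySem.List.pyRange 0 j 1).foldl (aBody s.toList j) st)
        ((fun _ _ => 0), 0, none)).2.2.getD ""

-- ===== PORT B =====
-- Loop body of B: first = dict of first occurrences, best_len/best = running maximum span and slice
-- (best : Option String; Source B's None is none).
def bBody (cs : List Char) (st : PySem.Dict Char Int × Int × Option String) (p : Int × Char) :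
    PySem.Dict Char Int × Int × Option String :=
  match st.1.get? p.2 with
  | some i =>
      let span := p.1 - i + 1
      if span > st.2.1 then
        (st.1, span, some (String.ofList (PySem.List.slice cs (some i) (some (p.1 + 1)))))
      else st
  | none => (st.1.insert p.2 p.1, st.2.1, st.2.2)

def my_longest_palin_2d_array_alt (s : String) : String :=
  if s = "" then s
  else
    -- Source B returns None (no repeated character): not a String — those inputs are outside Pre_,
    -- the .getD "" is never reached there.
    ((PySem.List.enumerate s.toList).foldl (bBody s.toList) (PySem.Dict.empty, 0, none)).2.2.getD ""

-- ===== PRECONDITION & SPEC =====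
-- Pre_ excludes exactly the inputs on which Python A raises: nonempty strings with all-distinct
-- characters (UnboundLocalError: 'res' is never assigned) and strings longer than 1000
-- (IndexError on the 1000×1000 dp table).
def Pre_my_longest_palin_2d_array (s : String) : Prop :=
  s = "" ∨ (s.toList.length ≤ 1000 ∧ ¬ s.toList.Nodup)
instance (s : String) : Decidable (Pre_my_longest_palin_2d_array s) := by
  unfold Pre_my_longest_palin_2d_array; infer_instance

def pvWitness_my_longest_palin_2d_array : String := "abca"

def Spec_my_longest_palin_2d_array (s : String) (out : String) : Prop :=
  out = my_longest_palin_2d_array_alt s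
instance (s : String) (out : String) : Decidable (Spec_my_longest_palin_2d_array s out) := by
  unfold Spec_my_longest_palin_2d_array; infer_instance

-- ===== CLAIM (what is proved, stated in full; the proofs are below) =====
def Claim_equal_my_longest_palin_2d_array : Prop :=
  ∀ (s : String), Dom_my_longest_palin_2d_array s → Pre_my_longest_palin_2d_array s →
    Spec_my_longest_palin_2d_array s (my_longest_palin_2d_array s)

-- ===== LEMMAS AND PROOFS =====

-- Common specification both ports reduce to: fold over positions j; at each j the only candidate
-- update uses i = the first index of cs[j] in cs[0:j] (the first matching i maximizes j - i + 1,
-- and the strict '>' means no later pair at the same j can fire).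
def specStep (cs : List Char) (st : Int × Option String) (j : Nat) : Int × Option String :=
  match (cs.take j).findIdx? (fun x => x = cs.getD j ' ') with
  | some i =>
      if ((j : Int) - (i : Int) + 1) > st.1 then
        ((j : Int) - (i : Int) + 1, some (String.ofList ((cs.drop i).take (j + 1 - i))))
      else st
  | none => st

lemma A_idle (cs : List Char) (j : Nat) :
    ∀ (cnt a : Nat) (dp : Int → Int → Int) (m : Int) (r : Option String),
      a + cnt ≤ j →
      (∀ i : Nat, a ≤ i → i < j → dp i j = 0) →
      (∀ i : Nat, a ≤ i → i < j → ((j : Int) - (i : Int) + 1) ≤ m) →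
      ((List.range' a cnt).foldl (fun st (i : Nat) => aBody cs j st i) (dp, m, r)).2 = (m, r) ∧
      (∀ x y : Int, y ≠ (j : Int) →
        ((List.range' a cnt).foldl (fun st (i : Nat) => aBody cs j st i) (dp, m, r)).1 x y = dp x y) := by
  intro cnt
  induction cnt with
  | zero => intro a dp m r _ _ _; simp
  | succ cnt ih =>
    intro a dp m r hle h0 hm
    rw [List.range'_succ, List.foldl_cons]
    have haj : a < j := by omega
    have hbody : aBody cs j (dp, m, r) a =
        ((if PySem.List.pyGetD cs (a:Int) ' ' = PySem.List.pyGetD cs (j:Int) ' ' then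
            fun x y => if x = (a:Int) ∧ y = (j:Int) then 1 else dp x y
          else dp), m, r) := by
      by_cases hc : PySem.List.pyGetD cs (a:Int) ' ' = PySem.List.pyGetD cs (j:Int) ' '
      · simp only [aBody, hc, if_pos]
        have hng : ¬ ((j:Int) - (a:Int) + 1 > m) := by have := hm a le_rfl haj; omega
        simp [hng]
      · simp only [aBody, hc, if_false]
        have h1 : dp (a:Int) (j:Int) = 0 := h0 a le_rfl haj
        simp [h1]
    rw [hbody]
    split_ifs with hc
    · have := ih (a+1) (fun x y => if x = (a:Int) ∧ y = (j:Int) then 1 else dp x y) m r (by omega)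
        (fun i hi hij => by
          have hne : ¬((i:Int) = (a:Int) ∧ (j:Int) = (j:Int)) := fun ⟨h1, _⟩ => by omega
          show (if (i:Int) = (a:Int) ∧ (j:Int) = (j:Int) then (1:Int) else dp i j) = 0
          rw [if_neg hne]; exact h0 i (by omega) hij)
        (fun i hi hij => hm i (by omega) hij)
      refine ⟨this.1, fun x y hy => ?_⟩
      rw [this.2 x y hy]
      have hne : ¬(x = (a:Int) ∧ y = (j:Int)) := fun ⟨_, h2⟩ => hy h2
      show (if x = (a:Int) ∧ y = (j:Int) then (1:Int) else dp x y) = dp x y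
      rw [if_neg hne]
    · exact ih (a+1) dp m r (by omega) (fun i hi hij => h0 i (by omega) hij)
        (fun i hi hij => hm i (by omega) hij)

lemma A_inner (cs : List Char) (j : Nat) (hj : j < cs.length) :
    ∀ (cnt a : Nat) (dp : Int → Int → Int) (m : Int) (r : Option String),
      a + cnt = j →
      (∀ i : Nat, a ≤ i → i < j → dp i j = 0) →
      ((List.range' a cnt).foldl (fun st (i : Nat) => aBody cs j st i) (dp, m, r)).2 =
        (match ((cs.take j).drop a).findIdx? (fun x => x = cs.getD j ' ') with
         | some k =>
             if ((j : Int) - ((a + k : Nat) : Int) + 1) > m then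
               ((j : Int) - ((a + k : Nat) : Int) + 1,
                some (String.ofList ((cs.drop (a + k)).take (j + 1 - (a + k)))))
             else (m, r)
         | none => (m, r)) ∧
      (∀ x y : Int, y ≠ (j : Int) →
        ((List.range' a cnt).foldl (fun st (i : Nat) => aBody cs j st i) (dp, m, r)).1 x y = dp x y) := by
  intro cnt
  induction cnt with
  | zero =>
    intro a dp m r hsum h0
    have : (cs.take j).drop a = [] := by
      apply List.drop_eq_nil_of_le
      simp [List.length_take]; omega
    simp [this]
  | succ cnt ih =>
    intro a dp m r hsum h0
    have haj : a < j := by omega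
    have halen : a < cs.length := by omega
    have hmin : a < (cs.take j).length := by simp [List.length_take]; omega
    have hdrop : (cs.take j).drop a = cs[a] :: (cs.take j).drop (a+1) := by
      rw [List.drop_eq_getElem_cons hmin]
      congr 1
      exact List.getElem_take
    have hgda : cs.getD a ' ' = cs[a] := List.getD_eq_getElem cs ' ' halen
    have hgdj : cs.getD j ' ' = cs[j] := List.getD_eq_getElem cs ' ' hj
    have hpga : PySem.List.pyGetD cs (a:Int) ' ' = cs[a] := by
      rw [PySem.List.pyGetD_natCast, hgda]
    have hpgj : PySem.List.pyGetD cs (j:Int) ' ' = cs[j] := by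
      rw [PySem.List.pyGetD_natCast, hgdj]
    rw [List.range'_succ, List.foldl_cons]
    by_cases hc : cs[a] = cs[j]
    · have hfind : ((cs.take j).drop a).findIdx? (fun x => x = cs.getD j ' ') = some 0 := by
        rw [hdrop, List.findIdx?_cons]
        simp [hc, List.getElem?_eq_getElem hj]
      rw [hfind]
      have hsl : PySem.List.slice cs (some (a:Int)) (some ((j:Int) + 1)) =
          (cs.drop a).take (j + 1 - a) := by
        have h2 : ((j:Int) + 1) = (((j+1:Nat)):Int) := by push_cast; ring
        rw [h2, PySem.List.slice_natCast]
      have hbody : aBody cs j (dp, m, r) a =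
          (if ((j:Int) - (a:Int) + 1) > m then
            ((fun x y => if x = (a:Int) ∧ y = (j:Int) then 1 else dp x y), (j:Int) - (a:Int) + 1,
             some (String.ofList ((cs.drop a).take (j + 1 - a))))
          else ((fun x y => if x = (a:Int) ∧ y = (j:Int) then 1 else dp x y), m, r)) := by
        show (let dp1 : Int → Int → Int :=
                if PySem.List.pyGetD cs (a:Int) ' ' = PySem.List.pyGetD cs (j:Int) ' ' then
                  fun x y => if x = (a:Int) ∧ y = (j:Int) then 1 else dp x y
                else dp
              if dp1 (a:Int) (j:Int) = 1 then
                if (j:Int) - (a:Int) + 1 > m then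
                  (dp1, (j:Int) - (a:Int) + 1,
                   some (String.ofList (PySem.List.slice cs (some (a:Int)) (some ((j:Int) + 1)))))
                else (dp1, m, r)
              else (dp1, m, r)) = _
        rw [hpga, hpgj, if_pos hc]
        rw [if_pos (show (if (a:Int) = (a:Int) ∧ (j:Int) = (j:Int) then (1:Int)
              else dp a j) = 1 by rw [if_pos ⟨rfl, rfl⟩])]
        rw [hsl]
      rw [hbody]
      simp only [Nat.add_zero]
      have hdp1 : ∀ i : Nat, a+1 ≤ i → i < j →
          (fun x y => if x = (a:Int) ∧ y = (j:Int) then 1 else dp x y) (i:Int) (j:Int) = 0 := by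
        intro i hi hij
        have hne : ¬((i:Int) = (a:Int) ∧ (j:Int) = (j:Int)) := fun ⟨h1, _⟩ => by omega
        show (if (i:Int) = (a:Int) ∧ (j:Int) = (j:Int) then (1:Int) else dp i j) = 0
        rw [if_neg hne]; exact h0 i (by omega) hij
      split_ifs with hspan
      · have hid := A_idle cs j cnt (a+1)
          (fun x y => if x = (a:Int) ∧ y = (j:Int) then 1 else dp x y)
          ((j:Int) - (a:Int) + 1)
          (some (String.ofList ((cs.drop a).take (j + 1 - a))))
          (by omega) hdp1
          (fun i hi hij => by omega)
        refine ⟨hid.1, fun x y hy => ?_⟩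
        rw [hid.2 x y hy]
        have hne : ¬(x = (a:Int) ∧ y = (j:Int)) := fun ⟨_, h2⟩ => hy h2
        show (if x = (a:Int) ∧ y = (j:Int) then (1:Int) else dp x y) = dp x y
        rw [if_neg hne]
      · have hid := A_idle cs j cnt (a+1)
          (fun x y => if x = (a:Int) ∧ y = (j:Int) then 1 else dp x y) m r
          (by omega) hdp1
          (fun i hi hij => by omega)
        refine ⟨hid.1, fun x y hy => ?_⟩
        rw [hid.2 x y hy]
        have hne : ¬(x = (a:Int) ∧ y = (j:Int)) := fun ⟨_, h2⟩ => hy h2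
        show (if x = (a:Int) ∧ y = (j:Int) then (1:Int) else dp x y) = dp x y
        rw [if_neg hne]
    · have hpf : decide (cs[a] = cs.getD j ' ') = false := by rw [hgdj]; simp [hc]
      have hfind : ((cs.take j).drop a).findIdx? (fun x => x = cs.getD j ' ') =
          Option.map (fun i => i + 1)
            (((cs.take j).drop (a+1)).findIdx? (fun x => x = cs.getD j ' ')) := by
        rw [hdrop, List.findIdx?_cons, hpf]
        simp
      rw [hfind]
      have hbody : aBody cs j (dp, m, r) a = (dp, m, r) := by
        show (let dp1 : Int → Int → Int :=
                if PySem.List.pyGetD cs (a:Int) ' ' = PySem.List.pyGetD cs (j:Int) ' ' then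
                  fun x y => if x = (a:Int) ∧ y = (j:Int) then 1 else dp x y
                else dp
              if dp1 (a:Int) (j:Int) = 1 then
                if (j:Int) - (a:Int) + 1 > m then
                  (dp1, (j:Int) - (a:Int) + 1,
                   some (String.ofList (PySem.List.slice cs (some (a:Int)) (some ((j:Int) + 1)))))
                else (dp1, m, r)
              else (dp1, m, r)) = _
        rw [hpga, hpgj, if_neg hc]
        rw [if_neg (show ¬ (dp (a:Int) (j:Int) = 1) by rw [h0 a le_rfl haj]; omega)]
      rw [hbody]
      have hih := ih (a+1) dp m r (by omega) (fun i hi hij => h0 i (by omega) hij)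
      refine ⟨?_, hih.2⟩
      rw [hih.1]
      rcases hfi : ((cs.take j).drop (a+1)).findIdx? (fun x => x = cs.getD j ' ') with _ | k
      · simp
      · simp only [Option.map_some]
        have heq : a + (k + 1) = a + 1 + k := by omega
        rw [heq]

lemma A_outer (cs : List Char) :
    ∀ (n : Nat), n ≤ cs.length →
      ((List.range n).foldl
          (fun st (j : Nat) => (List.range' 0 j).foldl (fun st (i : Nat) => aBody cs j st i) st)
          ((fun _ _ => 0), 0, none)).2 =
        (List.range n).foldl (specStep cs) (0, none) ∧
      (∀ x y : Int, (n : Int) ≤ y →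
        ((List.range n).foldl
            (fun st (j : Nat) => (List.range' 0 j).foldl (fun st (i : Nat) => aBody cs j st i) st)
            ((fun _ _ => 0), 0, none)).1 x y = 0) := by
  intro n
  induction n with
  | zero => intro _; simp
  | succ n ih =>
    intro hle
    obtain ⟨h1, h2⟩ := ih (by omega)
    rw [List.range_succ, List.foldl_append, List.foldl_append, List.foldl_cons, List.foldl_cons,
      List.foldl_nil, List.foldl_nil]
    set st := (List.range n).foldl
        (fun st (j : Nat) => (List.range' 0 j).foldl (fun st (i : Nat) => aBody cs j st i) st)
        ((fun _ _ => 0), 0, none) with hst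
    have hin := A_inner cs n (by omega) n 0 st.1 st.2.1 st.2.2 (by omega)
      (fun i _ hij => h2 i n (by exact_mod_cast le_rfl))
    have heta : st = (st.1, st.2.1, st.2.2) := rfl
    rw [← heta] at hin
    constructor
    · rw [hin.1, h1]
      show _ = specStep cs ((List.range n).foldl (specStep cs) (0, none)) n
      rw [← h1]
      unfold specStep
      simp only [List.drop_zero, Nat.zero_add]
    · intro x y hy
      rw [hin.2 x y (by omega), h2 x y (by omega)]

lemma A_eq_spec (cs : List Char) :
    ((PySem.List.pyRange 0 (PySem.List.len cs) 1).foldl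
        (fun st j => (PySem.List.pyRange 0 j 1).foldl (aBody cs j) st)
        ((fun _ _ => 0), 0, none)).2.2 =
      ((List.range cs.length).foldl (specStep cs) (0, none)).2 := by
  have hout : (PySem.List.pyRange 0 (PySem.List.len cs) 1) =
      (List.range cs.length).map (fun k : Nat => (k : Int)) := by
    rw [PySem.List.len_eq, PySem.List.pyRange_one]
    simp
  rw [hout, List.foldl_map]
  have hbodies : ∀ (st : (Int → Int → Int) × Int × Option String) (k : Nat),
      (PySem.List.pyRange 0 (k:Int) 1).foldl (aBody cs (k:Int)) st =
      (List.range' 0 k).foldl (fun st (i : Nat) => aBody cs (k:Int) st (i:Int)) st := by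
    intro st k
    have hin : (PySem.List.pyRange 0 (k:Int) 1) = (List.range k).map (fun t : Nat => (t : Int)) := by
      rw [PySem.List.pyRange_one]; simp
    rw [hin, List.foldl_map, List.range_eq_range']
  have hc : ((List.range cs.length).foldl
      (fun st (k : Nat) => (PySem.List.pyRange 0 (k:Int) 1).foldl (aBody cs (k:Int)) st)
      ((fun _ _ => 0), 0, none)) =
      ((List.range cs.length).foldl
      (fun st (j : Nat) => (List.range' 0 j).foldl (fun st (i : Nat) => aBody cs j st i) st)
      ((fun _ _ => 0), 0, none)) := by
    apply PySem.List.foldl_congr_mem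
    intro acc x _
    exact hbodies acc x
  rw [hc]
  rw [(A_outer cs cs.length le_rfl).1]

lemma B_run (cs : List Char) :
    ∀ (t : List Char) (j : Nat) (first : PySem.Dict Char Int) (m : Int) (r : Option String),
      cs.drop j = t → j ≤ cs.length →
      (∀ c : Char, first.get? c =
        ((cs.take j).findIdx? (fun x => x = c)).map (fun i : Nat => (i : Int))) →
      ((PySem.List.enumerate t (j : Int)).foldl (bBody cs) (first, m, r)).2 =
        (List.range' j t.length).foldl (specStep cs) (m, r) := by
  intro t
  induction t with
  | nil => intro j first m r _ _ _; simp [PySem.List.enumerate]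
  | cons x t' ih =>
    intro j first m r hdrop hjle hfst
    have hjlen : j < cs.length := by
      by_contra h
      rw [List.drop_eq_nil_of_le (by omega)] at hdrop
      simp at hdrop
    have hx : cs[j] = x := by
      have h0 := congrArg (fun l => l[0]?) hdrop
      simpa [List.getElem?_drop, List.getElem?_eq_getElem hjlen] using h0
    have ht' : cs.drop (j+1) = t' := by
      have h0 := congrArg List.tail hdrop
      simpa [List.tail_drop] using h0
    have hgdj : cs.getD j ' ' = x := by
      rw [List.getD_eq_getElem cs ' ' hjlen, hx]
    have henum : PySem.List.enumerate (x :: t') (j : Int) =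
        ((j : Int), x) :: PySem.List.enumerate t' ((j+1 : Nat) : Int) := by
      have hc : ((j:Int) + 1) = ((j+1 : Nat) : Int) := by push_cast; ring
      rw [show PySem.List.enumerate (x :: t') (j:Int) =
            ((j:Int), x) :: PySem.List.enumerate t' ((j:Int)+1) from rfl, hc]
    rw [henum, List.foldl_cons, List.length_cons, List.range'_succ, List.foldl_cons]
    have htake : cs.take (j+1) = cs.take j ++ [x] := by
      rw [List.take_succ_eq_append_getElem hjlen, hx]
    rcases hfi : (cs.take j).findIdx? (fun y => y = x) with _ | i
    · -- x unseen so far: B inserts, spec leaves the state unchanged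
      have hb : bBody cs (first, m, r) ((j : Int), x) =
          (first.insert x (j : Int), m, r) := by
        simp only [bBody, hfst x, hfi, Option.map_none]
      have hs : specStep cs (m, r) j = (m, r) := by
        unfold specStep
        simp only [hgdj, hfi]
      rw [hb, hs]
      apply ih (j+1) (first.insert x (j : Int)) m r ht' (by omega)
      intro c
      rw [htake, List.findIdx?_append]
      by_cases hcx : c = x
      · subst hcx
        rw [PySem.Dict.get?_insert_self, hfi]
        have h2 : ([c].findIdx? (fun y => y = c)) = some 0 := by simp
        rw [h2]
        simp [List.length_take, Nat.min_eq_left (le_of_lt hjlen)]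
      · rw [PySem.Dict.get?_insert, if_neg hcx, hfst c]
        have h1 : ([x].findIdx? (fun y => y = c)) = none := by
          simp [List.findIdx?_cons]
          exact fun h => (hcx h.symm).elim
        rw [h1]
        simp
    · -- x seen before at first index i: both sides take the same branch
      have hfst' : ∀ c : Char, first.get? c =
          ((cs.take (j+1)).findIdx? (fun y => y = c)).map (fun i : Nat => (i : Int)) := by
        intro c
        rw [htake, List.findIdx?_append]
        rcases hfc : (cs.take j).findIdx? (fun y => y = c) with _ | s
        · have hcx : ¬ (x = c) := by
            intro h; subst h; rw [hfc] at hfi; simp at hfi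
          have h1 : ([x].findIdx? (fun y => y = c)) = none := by
            simp [List.findIdx?_cons, hcx]
          rw [hfst c, hfc, h1]
          rfl
        · rw [hfst c, hfc]
          rfl
      have hcast : ((j:Int) + 1) = ((j+1 : Nat) : Int) := by push_cast; ring
      have hsl : PySem.List.slice cs (some (i:Int)) (some ((j:Int) + 1)) =
          (cs.drop i).take (j + 1 - i) := by
        rw [hcast, PySem.List.slice_natCast]
      by_cases hsp : ((j:Int) - (i:Int) + 1) > m
      · have hb : bBody cs (first, m, r) ((j : Int), x) =
            (first, (j:Int) - (i:Int) + 1,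
             some (String.ofList ((cs.drop i).take (j + 1 - i)))) := by
          simp only [bBody, hfst x, hfi, Option.map_some]
          rw [if_pos hsp, hsl]
        have hs : specStep cs (m, r) j =
            ((j:Int) - (i:Int) + 1, some (String.ofList ((cs.drop i).take (j + 1 - i)))) := by
          unfold specStep
          simp only [hgdj, hfi]
          rw [if_pos hsp]
        rw [hb, hs]
        exact ih (j+1) first ((j:Int) - (i:Int) + 1)
          (some (String.ofList ((cs.drop i).take (j + 1 - i)))) ht' (by omega) hfst'

      · have hb : bBody cs (first, m, r) ((j : Int), x) = (first, m, r) := by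
          simp only [bBody, hfst x, hfi, Option.map_some]
          rw [if_neg hsp]
        have hs : specStep cs (m, r) j = (m, r) := by
          unfold specStep
          simp only [hgdj, hfi]
          rw [if_neg hsp]
        rw [hb, hs]
        exact ih (j+1) first m r ht' (by omega) hfst'

lemma B_eq_spec (cs : List Char) :
    ((PySem.List.enumerate cs).foldl (bBody cs) (PySem.Dict.empty, 0, none)).2.2 =
      ((List.range cs.length).foldl (specStep cs) (0, none)).2 := by
  have h0 := B_run cs cs 0 PySem.Dict.empty 0 none (by simp) (by omega)
    (fun c => by simp [PySem.Dict.get?_empty])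
  have h2 := congrArg Prod.snd h0
  simpa [List.range_eq_range'] using h2

-- ===== VERDICT (by name: the statement is the Claim_ definition above) =====
theorem my_longest_palin_2d_array_spec : Claim_equal_my_longest_palin_2d_array := by
  intro s _ _
  unfold Spec_my_longest_palin_2d_array my_longest_palin_2d_array my_longest_palin_2d_array_alt
  by_cases h : s = ""
  · simp [h]
  · simp only [if_neg h]
    rw [A_eq_spec, B_eq_spec]
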